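-- pv_equiv track=rewrite | github.com/akranz79/automatizaLaudos | gerarLaudo.py | contar_respostas
-- ===== SOURCE A (Python) =====
-- def contar_respostas(dados):
--     aguia = 0
--     gato = 0
--     tubarao = 0
--     lobo = 0
--
--     # Supondo que os índices das colunas AC até BA sejam 28 até 53
--     for resposta in dados[28:54]:  # Colunas AC até BA
--         for letra in resposta:
--             if letra == 'I':
--                 aguia += 1
--             elif letra == 'C':
--                 gato += 1
--             elif letra == 'A':
--                 tubarao += 1
--             elif letra == 'O':
--                 lobo += 1
--
--     # Multiplicando cada contagem por 4 e adicionando o símbolo de porcentagem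
--     aguia_percent = f"{int(aguia) * 4}"
--     gato_percent = f"{int(gato) * 4}"
--     tubarao_percent = f"{int(tubarao) * 4}"
--     lobo_percent = f"{int(lobo) * 4}"
--
--     return aguia_percent, gato_percent, tubarao_percent, lobo_percent
-- ===== SOURCE B (Python) =====
-- def contar_respostas(dados):
--     linhas = dados[28:54]
--     aguia = sum(resposta.count('I') for resposta in linhas)
--     gato = sum(resposta.count('C') for resposta in linhas)
--     tubarao = sum(resposta.count('A') for resposta in linhas)
--     lobo = sum(resposta.count('O') for resposta in linhas)
--     return f"{aguia * 4}", f"{gato * 4}", f"{tubarao * 4}", f"{lobo * 4}"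
-- ===== Notes on version B (the rewrite author's own statement) =====
-- stated objective: simpler
-- what changed: Replaces the fused character loop with an if/elif chain and four counters by four independent str.count passes over the sliced rows, summed per letter.
import Mathlib
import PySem

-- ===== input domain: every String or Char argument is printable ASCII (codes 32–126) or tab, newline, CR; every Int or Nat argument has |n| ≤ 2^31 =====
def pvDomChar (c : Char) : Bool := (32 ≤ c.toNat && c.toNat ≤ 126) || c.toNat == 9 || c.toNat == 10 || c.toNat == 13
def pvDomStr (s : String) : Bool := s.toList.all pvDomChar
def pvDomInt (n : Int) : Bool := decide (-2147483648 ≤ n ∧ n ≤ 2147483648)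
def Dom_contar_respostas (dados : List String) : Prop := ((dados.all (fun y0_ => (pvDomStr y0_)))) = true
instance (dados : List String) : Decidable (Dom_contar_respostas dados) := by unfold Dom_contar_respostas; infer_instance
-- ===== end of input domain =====

-- B replaces A's fused if/elif counting loop by four independent per-letter count passes (objective: simpler).


-- ===== PORT A =====
-- the fused loop: one pass over dados[28:54], an if/elif chain updating four counters
def contarStepA (st : Int × Int × Int × Int) (letra : Char) : Int × Int × Int × Int :=
  if letra == 'I' then (st.1 + 1, st.2.1, st.2.2.1, st.2.2.2)
  else if letra == 'C' then (st.1, st.2.1 + 1, st.2.2.1, st.2.2.2)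
  else if letra == 'A' then (st.1, st.2.1, st.2.2.1 + 1, st.2.2.2)
  else if letra == 'O' then (st.1, st.2.1, st.2.2.1, st.2.2.2 + 1)
  else st

def contar_respostas (dados : List String) : String × String × String × String :=
  let st := (PySem.List.slice dados (some 28) (some 54)).foldl
    (fun st resposta => resposta.toList.foldl contarStepA st) (0, 0, 0, 0)
  (PySem.Int.toStr (st.1 * 4), PySem.Int.toStr (st.2.1 * 4),
   PySem.Int.toStr (st.2.2.1 * 4), PySem.Int.toStr (st.2.2.2 * 4))

-- ===== PORT B =====
-- four independent passes: sum of resposta.count(letter) over the slice, per letter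
def contarSum (linhas : List String) (letra : String) : Int :=
  (linhas.map (fun resposta => (PySem.Str.count resposta letra : Int))).sum

def contar_respostas_alt (dados : List String) : String × String × String × String :=
  let linhas := PySem.List.slice dados (some 28) (some 54)
  let aguia := contarSum linhas "I"
  let gato := contarSum linhas "C"
  let tubarao := contarSum linhas "A"
  let lobo := contarSum linhas "O"
  (PySem.Int.toStr (aguia * 4), PySem.Int.toStr (gato * 4),
   PySem.Int.toStr (tubarao * 4), PySem.Int.toStr (lobo * 4))

-- ===== PRECONDITION & SPEC =====
def Spec_contar_respostas (dados : List String) (out : String × String × String × String) : Prop := out = contar_respostas_alt dados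
instance (dados : List String) (out : String × String × String × String) : Decidable (Spec_contar_respostas dados out) := by unfold Spec_contar_respostas; infer_instance

-- ===== CLAIM (what is proved, stated in full; the proofs are below) =====
def Claim_equal_contar_respostas : Prop := ∀ (dados : List String), Dom_contar_respostas dados → Spec_contar_respostas dados (contar_respostas dados)

-- ===== LEMMAS AND PROOFS =====

-- Chars.count with a single-character needle is List.count
theorem count_go_singleton (c : Char) : ∀ (fuel : Nat) (l : List Char) (acc : Nat),
    l.length ≤ fuel → PySem.Chars.count.go [c] fuel l acc = acc + l.count c := by
  intro fuel
  induction fuel with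
  | zero => intro l acc h; cases l with
    | nil => simp [PySem.Chars.count.go]
    | cons x t => simp at h
  | succ n ih =>
    intro l acc h
    cases l with
    | nil => simp [PySem.Chars.count.go]
    | cons x t =>
      simp only [PySem.Chars.count.go]
      by_cases hx : x = c
      · subst hx
        simp only [List.isPrefixOf, BEq.rfl, Bool.true_and, if_pos]
        rw [show List.drop [x].length (x :: t) = t from rfl]
        rw [ih t (acc + 1) (by simpa using Nat.le_of_succ_le_succ h)]
        simp
        omega
      · have hcx : (x == c) = false := by simp [hx]
        have hcx' : (c == x) = false := by simp; exact fun h => hx h.symm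
        have : ([c].isPrefixOf (x :: t)) = false := by
          simp [List.isPrefixOf, hcx']
        rw [this]
        simp only [Bool.false_eq_true, if_false]
        rw [ih t acc (by simpa using Nat.le_of_succ_le_succ h)]
        simp [List.count_cons, hcx]

theorem chars_count_singleton (s : List Char) (c : Char) :
    PySem.Chars.count s [c] = s.count c := by
  rw [PySem.Chars.count]
  simp only [List.isEmpty_cons, Bool.false_eq_true, if_false]
  simpa using count_go_singleton c s.length s 0 (le_refl _)

-- the fused inner loop computes the four per-letter char counts
theorem contarStepA_eq (st : Int × Int × Int × Int) (x : Char) :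
    contarStepA st x = (st.1 + (if x = 'I' then 1 else 0), st.2.1 + (if x = 'C' then 1 else 0),
      st.2.2.1 + (if x = 'A' then 1 else 0), st.2.2.2 + (if x = 'O' then 1 else 0)) := by
  simp only [contarStepA, beq_iff_eq]
  split_ifs <;> simp_all

-- the fused inner loop computes the four per-letter char counts
theorem inner_loop (cs : List Char) : ∀ (a g t lo : Int),
    cs.foldl contarStepA (a, g, t, lo)
      = (a + cs.count 'I', g + cs.count 'C', t + cs.count 'A', lo + cs.count 'O') := by
  induction cs with
  | nil => intro a g t lo; simp
  | cons x cs ih =>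
    intro a g t lo
    rw [List.foldl_cons, contarStepA_eq]
    rw [ih]
    refine Prod.ext ?_ (Prod.ext ?_ (Prod.ext ?_ ?_)) <;>
      simp only [List.count_cons, beq_iff_eq] <;> push_cast <;> split_ifs <;> ring

-- the outer loop accumulates the sums of the per-row counts
theorem outer_loop (rs : List String) : ∀ (a g t lo : Int),
    rs.foldl (fun st resposta => resposta.toList.foldl contarStepA st) (a, g, t, lo)
      = (a + ((rs.map (fun r => (r.toList.count 'I' : Int))).sum),
         g + ((rs.map (fun r => (r.toList.count 'C' : Int))).sum),
         t + ((rs.map (fun r => (r.toList.count 'A' : Int))).sum),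
         lo + ((rs.map (fun r => (r.toList.count 'O' : Int))).sum)) := by
  induction rs with
  | nil => intro a g t lo; simp
  | cons r rs ih =>
    intro a g t lo
    simp only [List.foldl_cons, inner_loop, ih, List.map_cons, List.sum_cons]
    refine Prod.ext ?_ (Prod.ext ?_ (Prod.ext ?_ ?_)) <;> simp <;> ring

theorem contarSum_eq (rs : List String) (c : Char) :
    contarSum rs (String.ofList [c]) = (rs.map (fun r => (r.toList.count c : Int))).sum := by
  unfold contarSum
  congr 1
  apply List.map_congr_left
  intro r _
  rw [PySem.Str.count_eq, String.toList_ofList, chars_count_singleton]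

-- ===== VERDICT (by name: the statement is the Claim_ definition above) =====
theorem contar_respostas_spec : Claim_equal_contar_respostas := by
  intro dados _
  unfold Spec_contar_respostas contar_respostas contar_respostas_alt
  rw [outer_loop]
  have hI := contarSum_eq (PySem.List.slice dados (some 28) (some 54)) 'I'
  have hC := contarSum_eq (PySem.List.slice dados (some 28) (some 54)) 'C'
  have hA := contarSum_eq (PySem.List.slice dados (some 28) (some 54)) 'A'
  have hO := contarSum_eq (PySem.List.slice dados (some 28) (some 54)) 'O'
  simp only [] at hI hC hA hO ⊢
  rw [show ("I" : String) = String.ofList ['I'] from rfl, show ("C" : String) = String.ofList ['C'] from rfl,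
      show ("A" : String) = String.ofList ['A'] from rfl, show ("O" : String) = String.ofList ['O'] from rfl]
  rw [hI, hC, hA, hO]
  simp
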